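-- pv_equiv track=rewrite | github.com/jlcs/python | goodrich_1.py | all_strings_helper
-- ===== SOURCE A (Python) =====
-- def all_strings_helper(letters, n):
--     if (n ==1):
--         return list(letters)
--     else:
--         l = []
--         nMinusOneWords = all_strings_helper(letters, n-1)
--         for letter in letters:
--              l += [letter + word for word in nMinusOneWords if letter not in word]
--         return l
-- ===== SOURCE B (Python) =====
-- def all_strings_helper(letters, n):
--     words = list(letters)
--     for length in range(2, n + 1):
--         new = []
--         for letter in letters:
--             new += [letter + w for w in words if letter not in w]
--         words = new
--     return words
-- ===== Notes on version B (the rewrite author's own statement) =====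
-- stated objective: alternative
-- what changed: Replaces A's top-down recursion with an explicit bottom-up loop that iterates the one-letter-prepend step n-1 times starting from the single letters.
import Mathlib
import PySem

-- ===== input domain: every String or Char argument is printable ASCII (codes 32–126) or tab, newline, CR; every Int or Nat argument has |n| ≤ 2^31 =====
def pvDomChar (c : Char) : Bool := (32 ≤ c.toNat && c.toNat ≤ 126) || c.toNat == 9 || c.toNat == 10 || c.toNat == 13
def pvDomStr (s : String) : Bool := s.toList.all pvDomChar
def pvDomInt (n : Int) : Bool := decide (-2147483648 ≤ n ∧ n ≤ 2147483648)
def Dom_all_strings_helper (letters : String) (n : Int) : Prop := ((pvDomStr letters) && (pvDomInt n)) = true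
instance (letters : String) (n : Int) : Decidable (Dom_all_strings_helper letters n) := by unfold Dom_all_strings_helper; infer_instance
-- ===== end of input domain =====

-- B replaces A's top-down recursion by an explicit bottom-up loop iterating the prepend step
-- n-1 times from the single letters (objective: alternative decomposition, same output order).

-- ===== PORT A =====
-- A's recursion on n; fuel is n.toNat (Python recurses on n-1 until n == 1).
-- The value at fuel 0 is never used under Pre_ (Python A raises RecursionError for n ≤ 0).
def all_strings_helper_rec (cs : List Char) : Nat → List String
  | 0 => []
  | 1 => cs.map (fun c => String.ofList [c])
  | (m+2) =>
      let nMinusOneWords := all_strings_helper_rec cs (m+1)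
      -- for letter in letters: l += [letter + word for word in nMinusOneWords if letter not in word]
      cs.foldl (fun l c =>
        l ++ ((nMinusOneWords.filter (fun w => !(w.toList.contains c))).map
                (fun w => String.ofList (c :: w.toList)))) []

def all_strings_helper (letters : String) (n : Int) : List String :=
  all_strings_helper_rec letters.toList n.toNat

-- ===== PORT B =====
-- words = list(letters); for length in range(2, n+1): words = one prepend pass over words
def all_strings_helper_alt (letters : String) (n : Int) : List String :=
  let cs := letters.toList
  let init := cs.map (fun c => String.ofList [c])
  (List.range (n - 1).toNat).foldl
    (fun words _ =>
      cs.foldl (fun new c =>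
        new ++ ((words.filter (fun w => !(w.toList.contains c))).map
                  (fun w => String.ofList (c :: w.toList)))) [])
    init

-- ===== PRECONDITION & SPEC =====
-- Python A recurses without a base case for n ≤ 0 (RecursionError), so Pre_ requires n ≥ 1.
def Pre_all_strings_helper (letters : String) (n : Int) : Prop := 1 ≤ n
instance (letters : String) (n : Int) : Decidable (Pre_all_strings_helper letters n) := by unfold Pre_all_strings_helper; infer_instance
def pvWitness_all_strings_helper : String × Int := ("ab", 2)

def Spec_all_strings_helper (letters : String) (n : Int) (out : List String) : Prop := out = all_strings_helper_alt letters n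
instance (letters : String) (n : Int) (out : List String) : Decidable (Spec_all_strings_helper letters n out) := by unfold Spec_all_strings_helper; infer_instance

-- ===== CLAIM (what is proved, stated in full; the proofs are below) =====
def Claim_equal_all_strings_helper : Prop := ∀ (letters : String) (n : Int), Dom_all_strings_helper letters n → Pre_all_strings_helper letters n → Spec_all_strings_helper letters n (all_strings_helper letters n)

-- ===== LEMMAS AND PROOFS =====
-- A's recursion at fuel m+1 equals m iterations of B's loop body from the single letters.
theorem rec_eq_iter (cs : List Char) (m : Nat) :
    all_strings_helper_rec cs (m + 1) =
      (List.range m).foldl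
        (fun words _ =>
          cs.foldl (fun new c =>
            new ++ ((words.filter (fun w => !(w.toList.contains c))).map
                      (fun w => String.ofList (c :: w.toList)))) [])
        (cs.map (fun c => String.ofList [c])) := by
  induction m with
  | zero => simp [all_strings_helper_rec]
  | succ k ih =>
      rw [List.range_succ, List.foldl_append, ← ih]
      simp [all_strings_helper_rec]

-- ===== VERDICT (by name: the statement is the Claim_ definition above) =====
theorem all_strings_helper_spec : Claim_equal_all_strings_helper := by
  intro letters n _ hpre
  unfold Spec_all_strings_helper all_strings_helper all_strings_helper_alt
  have h1 : n.toNat = (n - 1).toNat + 1 := by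
    unfold Pre_all_strings_helper at hpre; omega
  rw [h1, rec_eq_iter]
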